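-- pv_equiv track=rewrite | github.com/IsaMukadam/Algorithms-in-Python | being-efficient/bit-string-example.py | count_ways2
-- ===== SOURCE A (Python) =====
-- def count_ways2(bits):
--     n = len(bits)
--     result = 0
--     zeros = 0
--     for i in range(len(bits)):
--         if bits[i] == '0':
--             zeros += 1
--         if bits[i] == '1':
--             result += zeros
--     return result
-- ===== SOURCE B (Python) =====
-- def count_ways2(bits):
--     n = len(bits)
--     result = 0
--     for i in range(n):
--         if bits[i] == '0':
--             for j in range(i + 1, n):
--                 if bits[j] == '1':
--                     result += 1
--     return result
-- ===== Notes on version B (the rewrite author's own statement) =====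
-- stated objective: alternative
-- what changed: Replaced the single-pass zeros-accumulator with a direct nested double loop that counts each (zero, later one) pair explicitly.
import Mathlib
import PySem

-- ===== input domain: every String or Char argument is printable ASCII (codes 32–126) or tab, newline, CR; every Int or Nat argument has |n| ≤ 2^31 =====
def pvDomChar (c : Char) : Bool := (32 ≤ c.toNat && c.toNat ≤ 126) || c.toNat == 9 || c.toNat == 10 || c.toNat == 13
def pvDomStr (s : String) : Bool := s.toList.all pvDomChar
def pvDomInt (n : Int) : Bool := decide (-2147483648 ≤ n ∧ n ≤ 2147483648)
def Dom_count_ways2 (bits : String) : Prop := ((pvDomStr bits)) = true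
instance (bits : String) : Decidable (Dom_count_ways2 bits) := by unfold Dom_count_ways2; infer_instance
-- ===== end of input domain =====

-- B replaces A's single accumulator pass by an explicit nested pair count (alternative decomposition, not faster).

-- ===== PORT A =====
-- A: one pass, maintaining (result, zeros); '0' bumps zeros, '1' adds zeros to result.
def count_ways2 (bits : String) : Int :=
  (bits.toList.foldl
    (fun (st : Int × Int) c =>
      let zeros := if c = '0' then st.2 + 1 else st.2
      let result := if c = '1' then st.1 + zeros else st.1
      (result, zeros))
    (0, 0)).1

-- ===== PORT B =====
-- inner loop of B: count the '1' characters in the suffix after position i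
def pvOnes (l : List Char) : Int :=
  match l with
  | [] => 0
  | c :: rest => (if c = '1' then 1 else 0) + pvOnes rest

-- outer loop of B: for each '0' at position i, add the number of later '1's
def pvPairs (l : List Char) : Int :=
  match l with
  | [] => 0
  | c :: rest => (if c = '0' then pvOnes rest else 0) + pvPairs rest

def count_ways2_alt (bits : String) : Int := pvPairs bits.toList

-- ===== PRECONDITION & SPEC =====
def Spec_count_ways2 (bits : String) (out : Int) : Prop := out = count_ways2_alt bits
instance (bits : String) (out : Int) : Decidable (Spec_count_ways2 bits out) := by unfold Spec_count_ways2; infer_instance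

-- ===== CLAIM (what is proved, stated in full; the proofs are below) =====
def Claim_equal_count_ways2 : Prop := ∀ (bits : String), Dom_count_ways2 bits → Spec_count_ways2 bits (count_ways2 bits)

-- ===== LEMMAS AND PROOFS =====
theorem pvFold_invariant (l : List Char) (result zeros : Int) :
    (l.foldl
      (fun (st : Int × Int) c =>
        let zeros := if c = '0' then st.2 + 1 else st.2
        let result := if c = '1' then st.1 + zeros else st.1
        (result, zeros))
      (result, zeros)).1 = result + zeros * pvOnes l + pvPairs l := by
  induction l generalizing result zeros with
  | nil => simp [pvOnes, pvPairs]
  | cons c rest ih =>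
    simp only [List.foldl, pvOnes, pvPairs]
    by_cases h0 : c = '0'
    · subst h0
      norm_num
      simp only [if_neg (show ('0':Char) ≠ '1' by decide)]
      rw [ih]
      ring
    · by_cases h1 : c = '1'
      · subst h1
        norm_num [h0]
        rw [ih]
        ring
      · simp only [h0, h1, if_false, ite_false]
        rw [ih]
        ring

-- ===== VERDICT (by name: the statement is the Claim_ definition above) =====
theorem count_ways2_spec : Claim_equal_count_ways2 := by
  intro bits _
  show count_ways2 bits = count_ways2_alt bits
  unfold count_ways2 count_ways2_alt
  rw [pvFold_invariant]
  ring
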